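-- pv_equiv track=rewrite | github.com/weskerhluffy/strasen_shit | src/strasen/poder_largote.py | sacacaca
-- ===== SOURCE A (Python) =====
-- def sacacaca(x):
--     powers = []
--     i = 1
--     while i <= x:
--         if i & x:
--             powers.append(i)
--         i <<= 1
--     return powers
-- ===== SOURCE B (Python) =====
-- def sacacaca(x):
--     if x <= 0:
--         return []
--     doubled = [2 * p for p in sacacaca(x // 2)]
--     return [1] + doubled if x % 2 else doubled
-- ===== Notes on version B (the rewrite author's own statement) =====
-- stated objective: alternative
-- what changed: A iterates a doubling bitmask i over a fixed x, appending i when `i & x`; B is recursive with no loop, no mask and no running power: it recurses on x // 2, doubles every element of the recursive result, and prepends 1 when x is odd.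
import Mathlib
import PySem

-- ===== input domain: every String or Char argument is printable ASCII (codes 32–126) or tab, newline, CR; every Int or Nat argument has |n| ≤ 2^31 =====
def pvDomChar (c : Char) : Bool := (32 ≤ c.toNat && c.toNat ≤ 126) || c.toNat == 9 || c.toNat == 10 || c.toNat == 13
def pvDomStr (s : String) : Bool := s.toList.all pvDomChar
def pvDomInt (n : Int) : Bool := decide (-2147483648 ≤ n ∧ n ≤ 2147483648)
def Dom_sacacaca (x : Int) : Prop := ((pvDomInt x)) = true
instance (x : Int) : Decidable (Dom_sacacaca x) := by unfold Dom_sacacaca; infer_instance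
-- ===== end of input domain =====

-- B replaces A's doubling-bitmask loop by loop-free recursion on x // 2 that doubles every
-- element of the recursive result and prepends 1 when x is odd (alternative, same value).

-- ===== PORT A =====
-- while i <= x: if i & x: powers.append(i); i <<= 1
-- (the `0 < i` conjunct is a totality guard only: i starts at 1 and doubles, so it always holds;
--  `i <<= 1` is ported as `i * 2`, exact; `if i & x:` is truthiness, i.e. `i & x ≠ 0`)
def sacacacaLoop (x i : Int) (powers : List Int) : List Int :=
  if _h : 0 < i ∧ i ≤ x then
    sacacacaLoop x (i * 2) (powers ++ (if PySem.Int.band i x ≠ 0 then [i] else []))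
  else powers
termination_by (x + 1 - i).toNat
decreasing_by omega

def sacacaca (x : Int) : List Int := sacacacaLoop x 1 []

-- ===== PORT B =====
-- if x <= 0: return []; doubled = [2*p for p in sacacaca(x // 2)]; return [1]+doubled if x % 2 else doubled
def sacacaca_alt (x : Int) : List Int :=
  if _h : x ≤ 0 then []
  else
    let doubled := (sacacaca_alt (PySem.Int.floordiv x 2)).map (fun p => 2 * p)
    if PySem.Int.mod x 2 ≠ 0 then 1 :: doubled else doubled
termination_by x.toNat
decreasing_by
  rw [PySem.Int.floordiv_eq_ediv_of_pos (by omega : (0:Int) < 2)]; omega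

-- ===== PRECONDITION & SPEC =====
def Spec_sacacaca (x : Int) (out : List Int) : Prop := out = sacacaca_alt x
instance (x : Int) (out : List Int) : Decidable (Spec_sacacaca x out) := by unfold Spec_sacacaca; infer_instance

-- ===== CLAIM (what is proved, stated in full; the proofs are below) =====
def Claim_equal_sacacaca : Prop := ∀ (x : Int), Dom_sacacaca x → Spec_sacacaca x (sacacaca x)

-- ===== LEMMAS AND PROOFS =====

-- A's loop at mask 2^k on a nonnegative input n appends B's recursive result for the
-- remaining high part n / 2^k, scaled by 2^k.
lemma sacacaca_loop_eq (m : Nat) : ∀ (n k : Nat) (powers : List Int), n / 2 ^ k = m →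
    sacacacaLoop (n : Int) ((2 : Int) ^ k) powers
      = powers ++ (sacacaca_alt ((n / 2 ^ k : Nat) : Int)).map (fun p => p * (2 : Int) ^ k) := by
  induction m using Nat.strong_induction_on with
  | _ m ih =>
    intro n k powers hm
    have hpowcast : ((2 : Int) ^ k) = ((2 ^ k : Nat) : Int) := by push_cast; ring
    rw [sacacacaLoop, sacacaca_alt]
    have hguard : ((0 : Int) < (2 : Int) ^ k ∧ (2 : Int) ^ k ≤ (n : Int)) ↔
        ¬ (((n / 2 ^ k : Nat) : Int) ≤ 0) := by
      constructor
      · rintro ⟨-, h⟩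
        have h1 : 2 ^ k ≤ n := by exact_mod_cast hpowcast ▸ h
        have h2 : 0 < n / 2 ^ k := Nat.div_pos h1 (Nat.two_pow_pos k)
        have h3 : (0:Int) < ((n / 2 ^ k : Nat) : Int) := by exact_mod_cast h2
        omega
      · intro h
        have h0 : (0:Int) < ((n / 2 ^ k : Nat) : Int) := by omega
        have h' : 0 < n / 2 ^ k := by exact_mod_cast h0
        have := (Nat.div_pos_iff.mp h').2
        constructor
        · positivity
        · rw [hpowcast]; exact_mod_cast this
    by_cases hg : (0 : Int) < (2 : Int) ^ k ∧ (2 : Int) ^ k ≤ (n : Int)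
    · rw [dif_pos hg, dif_neg (hguard.mp hg)]
      have htest : (PySem.Int.band ((2 : Int) ^ k) (n : Int) ≠ 0) ↔
          (PySem.Int.mod ((n / 2 ^ k : Nat) : Int) 2 ≠ 0) := by
        rw [hpowcast, PySem.Int.band_natCast, show ((2:Int)) = ((2:Nat):Int) by norm_num,
          PySem.Int.mod_natCast]
        have h1 : (2 ^ k &&& n) = (n.testBit k).toNat * 2 ^ k := by
          rw [Nat.land_comm]; exact Nat.and_two_pow n k
        have h2 : n.testBit k = decide (n / 2 ^ k % 2 = 1) :=
          Nat.testBit_eq_decide_div_mod_eq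
        constructor
        · intro h hc
          apply h
          have hc' : n / 2 ^ k % 2 = 0 := by exact_mod_cast hc
          have : n.testBit k = false := by rw [h2]; simp [hc']
          simp [h1, this]
        · intro h hc
          apply h
          have hc' : (2 ^ k &&& n) = 0 := by exact_mod_cast hc
          rw [h1] at hc'
          have : n.testBit k = false := by
            by_contra hb
            simp [eq_true_of_ne_false hb] at hc'
          rw [h2] at this
          have h3 : ¬ (n / 2 ^ k % 2 = 1) := by simpa using this
          have h4 : n / 2 ^ k % 2 = 0 := by omega
          exact_mod_cast congrArg (fun t : Nat => (t : Int)) h4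
      have hnext : PySem.Int.floordiv ((n / 2 ^ k : Nat) : Int) 2
          = ((n / 2 ^ (k + 1) : Nat) : Int) := by
        rw [show ((2:Int)) = ((2:Nat):Int) by norm_num, PySem.Int.floordiv_natCast]
        rw [Nat.div_div_eq_div_mul, ← pow_succ]
      have hmpos : 0 < m := by
        have h' := hguard.mp hg
        have h0 : (0:Int) < ((n / 2 ^ k : Nat) : Int) := by omega
        have h1 : 0 < n / 2 ^ k := by exact_mod_cast h0
        omega
      have hlt : n / 2 ^ (k + 1) < m := by
        have h0 : 0 < n / 2 ^ k := by rw [hm]; exact hmpos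
        calc n / 2 ^ (k + 1) = n / 2 ^ k / 2 := by rw [pow_succ, Nat.div_div_eq_div_mul]
          _ < n / 2 ^ k := Nat.div_lt_self h0 (by omega)
          _ = m := hm
      rw [hnext, show ((2:Int) ^ k * 2) = (2:Int) ^ (k + 1) by ring,
        ih (n / 2 ^ (k + 1)) hlt n (k + 1)
        (powers ++ (if PySem.Int.band ((2 : Int) ^ k) (n : Int) ≠ 0 then [(2 : Int) ^ k] else [])) rfl]
      have hmap : ((fun p => p * (2:Int) ^ k) ∘ (fun p => 2 * p)) = fun p => p * (2:Int) ^ (k + 1) := by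
        funext p; simp; ring
      by_cases ht : PySem.Int.band ((2 : Int) ^ k) (n : Int) ≠ 0
      · rw [if_pos ht, if_pos (htest.mp ht)]
        simp [List.map_map, hmap]
      · rw [if_neg ht, if_neg (fun hc => ht (htest.mpr hc))]
        simp [List.map_map, hmap]
    · rw [dif_neg hg, dif_pos (by by_contra hc; exact hg (hguard.mpr hc))]
      simp

-- ===== VERDICT (by name: the statement is the Claim_ definition above) =====
theorem sacacaca_spec : Claim_equal_sacacaca := by
  intro x _
  unfold Spec_sacacaca sacacaca
  by_cases hx : 0 < x
  · have hcast : x = ((x.toNat : Nat) : Int) := by omega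
    rw [hcast]
    have := sacacaca_loop_eq (x.toNat) x.toNat 0 [] (by simp)
    simpa using this
  · rw [sacacacaLoop, sacacaca_alt]
    rw [dif_neg (by omega), dif_pos (by omega)]
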